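-- pv_equiv track=rewrite | github.com/bahamouldi/beehivev6.0 | waf/ml_engine.py | _max_char_repeat
-- ===== SOURCE A (Python) =====
-- def _max_char_repeat(text: str) -> int:
--     """Find maximum consecutive character repetition."""
--     if not text:
--         return 0
--     max_repeat = 1
--     current = 1
--     for i in range(1, len(text)):
--         if text[i] == text[i-1]:
--             current += 1
--             max_repeat = max(max_repeat, current)
--         else:
--             current = 1
--     return max_repeat
-- ===== SOURCE B (Python) =====
-- def _max_char_repeat(text: str) -> int:
--     """Find maximum consecutive character repetition."""
--     if not text:
--         return 0
--     cuts = [0] + [i for i, (a, b) in enumerate(zip(text, text[1:]), 1) if a != b] + [len(text)]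
--     return max(b - a for a, b in zip(cuts, cuts[1:]))
-- ===== Notes on version B (the rewrite author's own statement) =====
-- stated objective: alternative
-- what changed: B works in two staged passes — first it builds the list of cut positions where adjacent characters differ (plus the two ends), then returns the maximum gap between consecutive cuts — instead of A's single pass maintaining current/max repeat counters.
import Mathlib
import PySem

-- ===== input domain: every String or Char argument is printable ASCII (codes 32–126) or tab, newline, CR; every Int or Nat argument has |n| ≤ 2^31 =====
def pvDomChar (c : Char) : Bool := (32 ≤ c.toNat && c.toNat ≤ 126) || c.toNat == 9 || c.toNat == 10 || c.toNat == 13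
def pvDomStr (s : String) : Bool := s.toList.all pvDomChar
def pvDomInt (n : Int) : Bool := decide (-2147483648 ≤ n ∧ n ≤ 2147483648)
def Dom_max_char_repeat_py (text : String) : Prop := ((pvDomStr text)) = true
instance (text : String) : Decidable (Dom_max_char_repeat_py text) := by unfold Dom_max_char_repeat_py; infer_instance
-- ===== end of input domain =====

-- B computes the answer in two staged passes (collect the boundary positions where adjacent
-- characters differ, then take the maximum gap between consecutive cut points) instead of A's
-- single pass with current/max counters; same return value, alternative algorithm of equal cost.

-- ===== PORT A =====
-- A's loop over range(1, len(text)) comparing text[i] with text[i-1], carried as structural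
-- recursion over the character list with the previous character as state.
def pvLoopA (prev : Char) (l : List Char) (maxr cur : Int) : Int :=
  match l with
  | [] => maxr
  | c :: rest =>
    if c == prev then pvLoopA c rest (max maxr (cur + 1)) (cur + 1)
    else pvLoopA c rest maxr 1

def max_char_repeat_py (text : String) : Int :=
  match text.toList with
  | [] => 0
  | c :: rest => pvLoopA c rest 1 1

-- ===== PORT B =====
-- Source B: cuts = [0] + [i for i, (a, b) in enumerate(zip(text, text[1:]), 1) if a != b] + [len(text)]
--       return max(b - a for a, b in zip(cuts, cuts[1:]))
-- (the max is over a nonempty list: cuts always has at least two elements here)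
def max_char_repeat_py_alt (text : String) : Int :=
  match text.toList with
  | [] => 0
  | _ :: _ =>
    let s := text.toList
    let cuts : List Int :=
      (0 :: ((PySem.List.enumerate (s.zip s.tail) 1).filter
        (fun p => !(p.2.1 == p.2.2))).map (fun p => p.1)) ++ [PySem.Str.len text]
    let ds := (cuts.zip cuts.tail).map (fun q => q.2 - q.1)
    (PySem.List.max? ds (fun x => x)).getD 0

-- ===== PRECONDITION & SPEC =====
def Spec_max_char_repeat_py (text : String) (out : Int) : Prop := out = max_char_repeat_py_alt text
instance (text : String) (out : Int) : Decidable (Spec_max_char_repeat_py text out) := by unfold Spec_max_char_repeat_py; infer_instance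

-- ===== CLAIM (what is proved, stated in full; the proofs are below) =====
def Claim_equal_max_char_repeat_py : Prop := ∀ (text : String), Dom_max_char_repeat_py text → Spec_max_char_repeat_py text (max_char_repeat_py text)

-- ===== LEMMAS AND PROOFS =====

-- B's boundary list, as a function of the remaining characters and the running pair index
def pvBreaks (k : Int) (l : List Char) : List Int :=
  ((PySem.List.enumerate (l.zip l.tail) k).filter (fun p => !(p.2.1 == p.2.2))).map (fun p => p.1)

-- B's gap list of a cut list
def pvGaps (cuts : List Int) : List Int :=
  (cuts.zip cuts.tail).map (fun q => q.2 - q.1)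

theorem pvBreaks_single (k : Int) (c : Char) : pvBreaks k [c] = [] := by
  simp [pvBreaks]

theorem pvBreaks_cons_eq (k : Int) (c d : Char) (t : List Char) (h : c = d) :
    pvBreaks k (c :: d :: t) = pvBreaks (k + 1) (d :: t) := by
  simp [pvBreaks, PySem.List.enumerate_cons, h]

theorem pvBreaks_cons_ne (k : Int) (c d : Char) (t : List Char) (h : c ≠ d) :
    pvBreaks k (c :: d :: t) = k :: pvBreaks (k + 1) (d :: t) := by
  simp [pvBreaks, PySem.List.enumerate_cons, h]

theorem pvGaps_cons (a b : Int) (t : List Int) :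
    pvGaps (a :: b :: t) = (b - a) :: pvGaps (b :: t) := by
  simp [pvGaps]

-- members of pvBreaks are ≥ k
theorem pvBreaks_ge (l : List Char) : ∀ (k x : Int), x ∈ pvBreaks k l → k ≤ x := by
  induction l with
  | nil => intro k x hx; simp [pvBreaks] at hx
  | cons c rest ih =>
    intro k x hx
    match rest with
    | [] => rw [pvBreaks_single] at hx; simp at hx
    | d :: t =>
      by_cases h : c = d
      · rw [pvBreaks_cons_eq k c d t h] at hx
        have := ih (k + 1) x hx; omega
      · rw [pvBreaks_cons_ne k c d t h] at hx
        rcases List.mem_cons.mp hx with h' | h'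
        · omega
        · have := ih (k + 1) x h'; omega

-- Main invariant: the running max over B's gap list, for the cut list made of the previous cut,
-- the remaining boundaries, and the final cut, equals A's counter loop.
theorem pvMain (rest : List Char) : ∀ (c : Char) (k prev mx : Int), prev < k →
    List.foldl max mx
      (pvGaps (prev :: pvBreaks k (c :: rest) ++ [k - 1 + (1 + (rest.length : Int))]))
    = pvLoopA c rest (max mx (k - prev)) (k - prev) := by
  induction rest with
  | nil =>
    intro c k prev mx _
    simp [pvBreaks_single, pvGaps, pvLoopA]
  | cons d t ih =>
    intro c k prev mx hpk
    by_cases h : d = c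
    · subst h
      rw [pvBreaks_cons_eq k d d t rfl]
      have := ih d (k + 1) prev mx (by omega)
      have harith : (k + 1) - 1 + (1 + (t.length : Int)) = k - 1 + (1 + ((d :: t).length : Int)) := by
        simp
        omega
      rw [harith] at this
      rw [this]
      simp only [pvLoopA, beq_self_eq_true, if_true]
      have : max (max mx (k - prev)) (k - prev + 1) = max mx (k + 1 - prev) := by omega
      rw [← this]
      congr 1
      omega
    · have hb : (d == c) = false := by simp [h]
      rw [pvBreaks_cons_ne k c d t (Ne.symm h)]
      simp only [List.cons_append]
      rw [pvGaps_cons, List.foldl_cons]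
      have := ih d (k + 1) k (max mx (k - prev)) (by omega)
      have harith : (k + 1) - 1 + (1 + (t.length : Int)) = k - 1 + (1 + ((d :: t).length : Int)) := by
        simp
        omega
      rw [harith] at this
      have h1 : (k + 1 : Int) - k = 1 := by omega
      have h2 : max (max mx (k - prev)) 1 = max mx (k - prev) := by omega
      rw [h1, h2] at this
      simp only [pvLoopA, hb, Bool.false_eq_true, if_false]
      exact this

theorem max_char_repeat_py_eq (text : String) :
    max_char_repeat_py text = max_char_repeat_py_alt text := by
  unfold max_char_repeat_py max_char_repeat_py_alt
  match h : text.toList with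
  | [] => rfl
  | c :: rest =>
    simp only [h]
    have hlen : PySem.Str.len text = 1 + (rest.length : Int) := by
      rw [PySem.Str.len_eq, h]; simp only [List.length_cons]; omega
    rw [hlen]
    -- B's value: max? of the nonempty gap list = running max over it
    have hmain := pvMain rest c 1 0 1 (by omega)
    have harith : (1 : Int) - 1 + (1 + (rest.length : Int)) = 1 + (rest.length : Int) := by omega
    rw [harith] at hmain
    -- identify B's let-expression with pvGaps / pvBreaks
    show pvLoopA c rest 1 1 =
      (PySem.List.max? (pvGaps ((0 :: pvBreaks 1 (c :: rest)) ++ [1 + (rest.length : Int)]))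
        (fun x => x)).getD 0
    have hA : pvLoopA c rest 1 1 = pvLoopA c rest (max 1 (1 - 0)) (1 - 0) := by norm_num
    rw [hA, ← hmain]
    -- the gap list is nonempty; its head is ≥ 1, so folding from 1 equals folding from the head
    match hbr : pvBreaks 1 (c :: rest) with
    | [] =>
      simp only [List.nil_append, List.cons_append]
      rw [show pvGaps [0, 1 + (rest.length : Int)] = [1 + (rest.length : Int) - 0] by simp [pvGaps]]
      rw [PySem.List.max?_id_cons]
      simp
    | b :: bs =>
      have hb1 : (1 : Int) ≤ b := pvBreaks_ge (c :: rest) 1 b (by rw [hbr]; simp)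
      simp only [List.cons_append]
      rw [pvGaps_cons, List.foldl_cons, PySem.List.max?_id_cons]
      simp only [Option.getD_some]
      congr 1
      omega

-- ===== VERDICT (by name: the statement is the Claim_ definition above) =====
theorem max_char_repeat_py_spec : Claim_equal_max_char_repeat_py := by
  intro text _
  exact max_char_repeat_py_eq text
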